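-- pv_equiv track=rewrite | github.com/Mrice-exe/CCC-Practice | J4try2.py | count
-- ===== SOURCE A (Python) =====
-- def count(line):
--     scount = 0
--     temp = 0
--     for i in range(len(line)):
--         if line[i] == "S":
--             temp += 1
--         if line[i] == "P" or i+1 >= len(line):
--             if temp > scount:
--                 scount = temp
--             temp = 0
--
--     return scount
-- ===== SOURCE B (Python) =====
-- def count(line):
--     return max((part.count('S') for part in line.split('P')), default=0)
-- ===== Notes on version B (the rewrite author's own statement) =====
-- stated objective: simpler
-- what changed: Replaces the char-by-char index loop with running accumulator and manual last-index flush by a one-liner: split the string on 'P' and take the max of the per-segment 'S' counts.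
import Mathlib
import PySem

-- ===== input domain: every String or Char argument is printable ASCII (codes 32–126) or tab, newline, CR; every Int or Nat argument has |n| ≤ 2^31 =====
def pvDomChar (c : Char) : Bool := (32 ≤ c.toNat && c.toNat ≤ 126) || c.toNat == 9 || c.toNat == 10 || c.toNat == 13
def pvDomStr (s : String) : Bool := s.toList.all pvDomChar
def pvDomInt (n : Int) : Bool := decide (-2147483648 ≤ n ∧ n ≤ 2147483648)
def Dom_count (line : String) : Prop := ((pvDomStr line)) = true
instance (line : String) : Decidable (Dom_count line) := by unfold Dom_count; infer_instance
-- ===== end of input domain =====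

-- B replaces A's indexed loop with running accumulator and manual last-index flush
-- by "max of per-segment 'S' counts over the 'P'-split" (objective: simpler).


-- ===== PORT A =====
-- scount/temp loop over range(len(line)); flush on 'P' or at the last index.
def count (line : String) : Int :=
  let cs := line.toList
  let n : Int := (cs.length : Int)
  ((PySem.List.pyRange 0 n 1).foldl (fun (st : Int × Int) i =>
      let c := PySem.List.pyGetD cs i ' '
      let temp := if c == 'S' then st.2 + 1 else st.2
      if c == 'P' || decide (i + 1 ≥ n) then
        ((if temp > st.1 then temp else st.1), 0)
      else (st.1, temp)) (0, 0)).1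

-- ===== PORT B =====
-- max((part.count('S') for part in line.split('P')), default=0)
def count_alt (line : String) : Int :=
  PySem.List.maxD
    ((PySem.Chars.splitOn line.toList ['P']).map
      (fun part => (PySem.Chars.count part ['S'] : Int)))
    id 0

-- ===== PRECONDITION & SPEC =====
def Spec_count (line : String) (out : Int) : Prop := out = count_alt line
instance (line : String) (out : Int) : Decidable (Spec_count line out) := by unfold Spec_count; infer_instance

-- ===== CLAIM (what is proved, stated in full; the proofs are below) =====
def Claim_equal_count : Prop := ∀ (line : String), Dom_count line → Spec_count line (count line)

-- ===== LEMMAS AND PROOFS =====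

-- A's loop as a structural recursion over the remaining characters.
def runA : List Char → Int → Int → Int
  | [], sc, _ => sc
  | c :: rest, sc, t =>
    let t' := if c == 'S' then t + 1 else t
    if c == 'P' || rest.isEmpty then runA rest (if t' > sc then t' else sc) 0
    else runA rest sc t'

-- best segment S-count, with t the S-count of the (open) current segment
def bw : List Char → Int → Int
  | [], t => t
  | c :: cs, t => if c == 'P' then max t (bw cs 0) else bw cs (if c == 'S' then t + 1 else t)

-- the list of per-segment S-counts, current segment already holding t
def segs : List Char → Int → List Int
  | [], t => [t]
  | c :: cs, t => if c == 'P' then t :: segs cs 0 else segs cs (if c == 'S' then t + 1 else t)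

-- split with an accumulated (reversed) current piece: the shape of splitOn.go for a 1-char sep
def mysplit : List Char → List Char → List (List Char)
  | [], cur => [cur.reverse]
  | c :: rest, cur => if c == 'P' then cur.reverse :: mysplit rest [] else mysplit rest (c :: cur)

theorem aloop (cs : List Char) :
    ∀ (suf pre : List Char) (st : Int × Int), cs = pre ++ suf →
    ((PySem.List.pyRange ((pre.length : Nat) : Int) ((cs.length : Nat) : Int) 1).foldl
      (fun (st : Int × Int) i =>
        let c := PySem.List.pyGetD cs i ' '
        let temp := if c == 'S' then st.2 + 1 else st.2
        if c == 'P' || decide (i + 1 ≥ ((cs.length : Nat) : Int)) then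
          ((if temp > st.1 then temp else st.1), 0)
        else (st.1, temp)) st).1 = runA suf st.1 st.2 := by
  intro suf
  induction suf with
  | nil =>
      intro pre st h
      subst h
      rw [PySem.List.pyRange_one_eq_nil (by simp)]
      rfl
  | cons c rest ih =>
      intro pre st h
      have hlen : cs.length = pre.length + (rest.length + 1) := by
        subst h; simp
      have hlt : ((pre.length : Nat) : Int) < ((cs.length : Nat) : Int) := by
        exact_mod_cast (by omega : pre.length < cs.length)
      rw [PySem.List.pyRange_one_cons hlt]
      rw [List.foldl_cons]
      have hget : PySem.List.pyGetD cs ((pre.length : Nat) : Int) ' ' = c := by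
        rw [PySem.List.pyGetD_natCast]
        subst h
        simp [List.getD, List.getElem?_append_right (Nat.le_refl pre.length)]
      have hcond : (decide (((pre.length : Nat) : Int) + 1 ≥ ((cs.length : Nat) : Int))) = rest.isEmpty := by
        cases rest with
        | nil =>
            simp only [List.length_nil] at hlen
            simp only [List.isEmpty_nil, decide_eq_true_eq, ge_iff_le]
            push_cast
            omega
        | cons d ds =>
            simp only [List.length_cons] at hlen
            simp only [List.isEmpty_cons, decide_eq_false_iff_not, ge_iff_le, not_le]
            push_cast
            omega
      have hpre1 : ((pre.length : Nat) : Int) + 1 = (((pre ++ [c]).length : Nat) : Int) := by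
        simp
      simp only [hget]
      rw [hcond, hpre1]
      by_cases hc : (c == 'P' || rest.isEmpty) = true
      · simp only [hc, if_true]
        rw [ih (pre ++ [c]) _ (by simp [h])]
        simp [runA, hc]
      · have hc' : (c == 'P' || rest.isEmpty) = false := by simpa using hc
        simp only [hc', if_false]
        rw [ih (pre ++ [c]) _ (by simp [h])]
        simp [runA, hc']

theorem runA_eq_bw : ∀ (cs : List Char) (sc t : Int), cs ≠ [] → 0 ≤ t →
    runA cs sc t = max sc (bw cs t) := by
  intro cs
  induction cs with
  | nil => intro _ _ h; exact absurd rfl h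
  | cons c rest ih =>
      intro sc t _ ht
      rw [runA, bw]
      cases rest with
      | nil =>
          by_cases hc : c == 'P'
          · have hs : (c == 'S') = false := by
              simp only [beq_iff_eq] at hc ⊢; subst hc; decide
            simp [runA, bw, hc, hs]; omega
          · by_cases hs : c == 'S' <;> simp [runA, bw, hc, hs] <;> omega
      | cons d ds =>
          have hne : ((d : Char) :: ds).isEmpty = false := rfl
          by_cases hc : c == 'P'
          · have hs : (c == 'S') = false := by
              simp only [beq_iff_eq] at hc ⊢; subst hc; decide
            simp only [hc, Bool.true_or, if_true]
            rw [ih _ _ (by simp) (le_refl 0)]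
            simp [hs]
            omega
          · have hs' : 0 ≤ (if c == 'S' then t + 1 else t) := by
              by_cases hs : c == 'S' <;> simp [hs] <;> omega
            simp only [hc, hne, Bool.or_false, if_false, Bool.false_eq_true]
            rw [ih _ _ (by simp) hs']

theorem foldmax_segs : ∀ (cs : List Char) (t a : Int),
    (segs cs t).foldl max a = max a (bw cs t) := by
  intro cs
  induction cs with
  | nil => intro t a; simp [segs, bw]
  | cons c rest ih =>
      intro t a
      by_cases hc : c == 'P'
      · simp only [segs, bw, hc, if_true, List.foldl_cons]
        rw [ih]
        omega
      · simp only [segs, bw, hc, if_false, Bool.false_eq_true]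
        exact ih _ _

theorem segs_head_nonneg : ∀ (cs : List Char) (t : Int), 0 ≤ t →
    ∀ x ∈ segs cs t, 0 ≤ x := by
  intro cs
  induction cs with
  | nil => intro t ht x hx; simp [segs] at hx; omega
  | cons c rest ih =>
      intro t ht x hx
      by_cases hc : c == 'P'
      · simp only [segs, hc, if_true, List.mem_cons] at hx
        cases hx with
        | inl h => subst h; exact ht
        | inr h => exact ih 0 (le_refl 0) x h
      · simp only [segs, hc, if_false, Bool.false_eq_true] at hx
        refine ih _ ?_ x hx
        by_cases hs : c == 'S' <;> simp [hs] <;> omega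

theorem segs_ne_nil : ∀ (cs : List Char) (t : Int), segs cs t ≠ [] := by
  intro cs
  induction cs with
  | nil => intro t; simp [segs]
  | cons c rest ih =>
      intro t
      by_cases hc : c == 'P' <;> simp [segs, hc, ih]

theorem goSplit : ∀ (fuel : Nat) (cs cur : List Char) (acc : List (List Char)),
    cs.length < fuel →
    PySem.Chars.splitOn.go ['P'] fuel cs cur acc = acc.reverse ++ mysplit cs cur := by
  intro fuel
  induction fuel with
  | zero => intro cs cur acc h; omega
  | succ f ih =>
      intro cs cur acc h
      cases cs with
      | nil => simp [PySem.Chars.splitOn.go, mysplit]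
      | cons c rest =>
          by_cases hc : c = 'P'
          · subst hc
            have hp : List.isPrefixOf ['P'] ('P' :: rest) = true := by
              simp [List.isPrefixOf]
            simp only [PySem.Chars.splitOn.go, hp, if_pos rfl]
            rw [ih _ _ _ (by simpa using Nat.lt_of_succ_lt_succ h)]
            simp [mysplit]
          · have hp : List.isPrefixOf ['P'] (c :: rest) = false := by
              simp [List.isPrefixOf, hc]; exact fun h' => absurd h'.symm hc
            simp only [PySem.Chars.splitOn.go, hp, Bool.false_eq_true, if_false]
            rw [ih _ _ _ (by simpa using Nat.lt_of_succ_lt_succ h)]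
            simp [mysplit, hc]

theorem goCount : ∀ (fuel : Nat) (cs : List Char) (acc : Nat),
    cs.length ≤ fuel →
    PySem.Chars.count.go ['S'] fuel cs acc = acc + cs.countP (· == 'S') := by
  intro fuel
  induction fuel with
  | zero =>
      intro cs acc h
      cases cs with
      | nil => simp [PySem.Chars.count.go]
      | cons c rest => simp at h
  | succ f ih =>
      intro cs acc h
      cases cs with
      | nil => simp [PySem.Chars.count.go]
      | cons c rest =>
          by_cases hc : c = 'S'
          · subst hc
            have hp : List.isPrefixOf ['S'] ('S' :: rest) = true := by
              simp [List.isPrefixOf]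
            simp only [PySem.Chars.count.go, hp, if_pos rfl]
            rw [ih _ _ (by simpa using Nat.le_of_succ_le_succ h)]
            simp [List.countP_cons]
            omega
          · have hp : List.isPrefixOf ['S'] (c :: rest) = false := by
              simp [List.isPrefixOf]; exact fun h' => absurd h'.symm hc
            simp only [PySem.Chars.count.go, hp, Bool.false_eq_true, if_false]
            rw [ih _ _ (by simpa using Nat.le_of_succ_le_succ h)]
            simp [List.countP_cons, hc]

theorem countS_eq (cs : List Char) :
    PySem.Chars.count cs ['S'] = cs.countP (· == 'S') := by
  simp only [PySem.Chars.count, List.isEmpty]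
  rw [goCount _ _ _ (le_refl _)]
  simp

theorem counts_mysplit : ∀ (cs cur : List Char),
    (mysplit cs cur).map (fun part => (PySem.Chars.count part ['S'] : Int))
      = segs cs ((cur.countP (· == 'S') : Nat) : Int) := by
  intro cs
  induction cs with
  | nil =>
      intro cur
      simp [mysplit, segs, countS_eq, List.countP_reverse]
  | cons c rest ih =>
      intro cur
      by_cases hc : c == 'P'
      · simp only [mysplit, segs, hc, if_true, List.map_cons]
        rw [ih []]
        simp [countS_eq, List.countP_reverse]
      · simp only [mysplit, segs, hc, if_false, Bool.false_eq_true]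
        rw [ih (c :: cur)]
        by_cases hs : c == 'S' <;> simp [hs, List.countP_cons]

theorem foldl_opt (f : Option Int → Int → Option Int)
    (hf : ∀ m y, f (some m) y = some (max m y)) :
    ∀ (xs : List Int) (m : Int), List.foldl f (some m) xs = some (xs.foldl max m) := by
  intro xs
  induction xs with
  | nil => intro m; rfl
  | cons y rest ih => intro m; rw [List.foldl_cons, hf, ih, List.foldl_cons]

theorem maxD_cons (x : Int) (xs : List Int) :
    PySem.List.maxD (x :: xs) id 0 = xs.foldl max x := by
  simp only [PySem.List.maxD, PySem.List.max?, List.foldl_cons]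
  rw [foldl_opt _ ?hf]
  · rfl
  · intro m y
    show (if id m < id y then some y else some m) = some (max m y)
    split_ifs with h
    · simp only [id_eq] at h; simp; omega
    · simp only [id_eq] at h; simp; omega

-- ===== VERDICT (by name: the statement is the Claim_ definition above) =====
theorem count_spec : Claim_equal_count := by
  intro line _
  unfold Spec_count
  have hA : count line = runA line.toList 0 0 := by
    exact aloop line.toList line.toList [] (0, 0) rfl
  have hB : count_alt line
      = PySem.List.maxD (segs line.toList 0) id 0 := by
    unfold count_alt
    rw [PySem.Chars.splitOn, goSplit _ _ _ _ (by omega)]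
    simp only [List.reverse_nil, List.nil_append]
    congr 1
    simpa using counts_mysplit line.toList []
  rw [hA, hB]
  set cs := line.toList
  obtain ⟨x, xs, hseg⟩ : ∃ x xs, segs cs 0 = x :: xs := by
    cases h : segs cs 0 with
    | nil => exact absurd h (segs_ne_nil cs 0)
    | cons x xs => exact ⟨x, xs, rfl⟩
  have hx : 0 ≤ x := segs_head_nonneg cs 0 (le_refl 0) x (by rw [hseg]; simp)
  rw [hseg, maxD_cons]
  have hrun : runA cs 0 0 = max 0 (bw cs 0) := by
    cases cs with
    | nil => simp [runA, bw]
    | cons c rest => rw [runA_eq_bw _ _ _ (by simp) (le_refl 0)]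
  rw [hrun]
  have hfm := foldmax_segs cs 0 0
  rw [hseg] at hfm
  simp only [List.foldl_cons] at hfm
  rw [← hfm]
  have : max (0 : Int) x = x := by omega
  rw [this]
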